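-- pv_equiv track=rewrite | github.com/LLian7/Sig_artifact | benchmark_treeawareVisp/treeaware_isp.py | _node_cover_count
-- ===== SOURCE A (Python) =====
-- def _node_cover_count(leaf_mask: int, leaf_count: int) -> int:
--     if leaf_mask == 0:
--         return 0
--     full_mask = (1 << leaf_count) - 1
--     if leaf_mask == full_mask:
--         return 1
--     padded_count = 1 << (leaf_count - 1).bit_length()
--     padded_full_mask = (1 << padded_count) - 1
--     if leaf_mask == padded_full_mask:
--         return 1
--
--     total = 0
--     stack = [(leaf_mask, padded_count)]
--     while stack:
--         mask, width = stack.pop()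
--         if mask == 0:
--             continue
--         if width == 1:
--             total += 1
--             continue
--         interval_mask = (1 << width) - 1
--         if mask == interval_mask:
--             total += 1
--             continue
--         half = width >> 1
--         low_mask = mask & ((1 << half) - 1)
--         high_mask = mask >> half
--         stack.append((high_mask, half))
--         stack.append((low_mask, half))
--     return total
-- ===== SOURCE B (Python) =====
-- def _node_cover_count(leaf_mask: int, leaf_count: int) -> int:
--     if leaf_mask == 0:
--         return 0
--     full_mask = (1 << leaf_count) - 1
--     if leaf_mask == full_mask:
--         return 1
--     padded_count = 1 << (leaf_count - 1).bit_length()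
--     padded_full_mask = (1 << padded_count) - 1
--     if leaf_mask == padded_full_mask:
--         return 1
--
--     def count(mask, width):
--         if mask == 0:
--             return 0
--         if width == 1 or mask == (1 << width) - 1:
--             return 1
--         half = width >> 1
--         return count(mask & ((1 << half) - 1), half) + count(mask >> half, half)
--
--     return count(leaf_mask, padded_count)
-- ===== Notes on version B (the rewrite author's own statement) =====
-- stated objective: simpler
-- what changed: Replaced the explicit worklist stack and accumulator loop with a direct recursive divide-and-conquer helper over the dyadic tree.
import Mathlib
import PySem

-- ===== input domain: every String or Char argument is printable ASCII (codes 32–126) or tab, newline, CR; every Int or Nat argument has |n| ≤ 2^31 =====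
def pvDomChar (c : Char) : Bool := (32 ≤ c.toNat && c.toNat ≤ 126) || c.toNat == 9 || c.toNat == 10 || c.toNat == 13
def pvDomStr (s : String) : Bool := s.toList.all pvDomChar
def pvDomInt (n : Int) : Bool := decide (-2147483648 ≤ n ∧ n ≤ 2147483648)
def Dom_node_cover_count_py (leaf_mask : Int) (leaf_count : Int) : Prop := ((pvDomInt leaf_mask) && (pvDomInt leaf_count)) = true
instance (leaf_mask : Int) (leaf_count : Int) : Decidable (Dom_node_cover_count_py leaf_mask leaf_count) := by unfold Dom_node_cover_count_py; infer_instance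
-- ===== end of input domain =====

-- B replaces A's explicit worklist stack with a direct recursive divide-and-conquer helper (simpler decomposition, same cost).


-- ===== PORT A =====
-- A's while-loop over an explicit stack. Widths are kept as Nat: on every admitted
-- input the only widths that occur are padded_count = 2^bitLength (a Nat) and its
-- halves, all nonnegative. The 'width < 2' branch is a totality guard only: on that
-- (unreachable from the entry point) state Python's loop would diverge; we skip the
-- entry instead.
def nccLoop (stack : List (Int × Nat)) (total : Int) : Int :=
  match stack with
  | [] => total
  | (mask, width) :: rest =>
    if mask = 0 then nccLoop rest total
    else if width = 1 then nccLoop rest (total + 1)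
    else if mask = ((1 <<< width : Nat) : Int) - 1 then nccLoop rest (total + 1)
    else if width < 2 then nccLoop rest total   -- unreachable totality guard (Python diverges here)
    else
      nccLoop ((PySem.Int.band mask (((1 <<< (width >>> 1) : Nat) : Int) - 1), width >>> 1) ::
               (mask >>> (width >>> 1), width >>> 1) :: rest) total
termination_by (stack.map (fun p => p.2 * p.2)).sum + stack.length
decreasing_by
  · simp; omega
  · simp; omega
  · simp; omega
  · simp; omega
  · simp only [List.map_cons, List.sum_cons, List.length_cons]
    have key : (width >>> 1) * (width >>> 1) * 2 + 2 ≤ width * width := by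
      simp only [Nat.shiftRight_succ, Nat.shiftRight_zero]
      have hd : 1 ≤ width / 2 := by omega
      have h2 : width = 2 * (width / 2) + width % 2 := by omega
      nlinarith [h2, hd, Nat.zero_le (width % 2)]
    omega

def node_cover_count_py (leaf_mask : Int) (leaf_count : Int) : Int :=
  if leaf_mask = 0 then 0
  else
    -- Python raises ValueError for leaf_count < 0 here; Pre_ excludes that, .toNat is a totality guard
    let full_mask : Int := (1 <<< leaf_count.toNat) - 1
    if leaf_mask = full_mask then 1
    else
      let padded_count : Nat := 1 <<< PySem.Int.bitLength (leaf_count - 1)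
      let padded_full_mask : Int := (1 <<< padded_count) - 1
      if leaf_mask = padded_full_mask then 1
      else nccLoop [(leaf_mask, padded_count)] 0

-- ===== PORT B =====
-- B's recursive helper 'count'. Same totality guard note as for A's loop: 'width < 2'
-- with nonzero non-full mask is unreachable from the entry point.
def nccCount (mask : Int) (width : Nat) : Int :=
  if mask = 0 then 0
  else if width = 1 ∨ mask = ((1 <<< width : Nat) : Int) - 1 then 1
  else if width < 2 then 0   -- unreachable totality guard (Python recurses forever here)
  else
    nccCount (PySem.Int.band mask (((1 <<< (width >>> 1) : Nat) : Int) - 1)) (width >>> 1) +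
    nccCount (mask >>> (width >>> 1)) (width >>> 1)
termination_by width
decreasing_by
  all_goals simp only [Nat.shiftRight_succ, Nat.shiftRight_zero]; omega

def node_cover_count_py_alt (leaf_mask : Int) (leaf_count : Int) : Int :=
  if leaf_mask = 0 then 0
  else
    let full_mask : Int := (1 <<< leaf_count.toNat) - 1
    if leaf_mask = full_mask then 1
    else
      let padded_count : Nat := 1 <<< PySem.Int.bitLength (leaf_count - 1)
      let padded_full_mask : Int := (1 <<< padded_count) - 1
      if leaf_mask = padded_full_mask then 1
      else nccCount leaf_mask padded_count

-- ===== PRECONDITION & SPEC =====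
-- Pre_ excludes exactly the inputs where Python A raises: leaf_mask ≠ 0 with
-- leaf_count < 0 ('1 << leaf_count' is a ValueError).
def Pre_node_cover_count_py (leaf_mask : Int) (leaf_count : Int) : Prop :=
  leaf_mask = 0 ∨ 0 ≤ leaf_count
instance (leaf_mask : Int) (leaf_count : Int) : Decidable (Pre_node_cover_count_py leaf_mask leaf_count) := by unfold Pre_node_cover_count_py; infer_instance
def pvWitness_node_cover_count_py : Int × Int := (9, 4)

def Spec_node_cover_count_py (leaf_mask : Int) (leaf_count : Int) (out : Int) : Prop := out = node_cover_count_py_alt leaf_mask leaf_count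
instance (leaf_mask : Int) (leaf_count : Int) (out : Int) : Decidable (Spec_node_cover_count_py leaf_mask leaf_count out) := by unfold Spec_node_cover_count_py; infer_instance

-- ===== CLAIM (what is proved, stated in full; the proofs are below) =====
def Claim_equal_node_cover_count_py : Prop := ∀ (leaf_mask : Int) (leaf_count : Int), Dom_node_cover_count_py leaf_mask leaf_count → Pre_node_cover_count_py leaf_mask leaf_count → Spec_node_cover_count_py leaf_mask leaf_count (node_cover_count_py leaf_mask leaf_count)

-- ===== LEMMAS AND PROOFS =====
theorem nccCount_zero (w : Nat) : nccCount 0 w = 0 := by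
  rw [nccCount]; simp

theorem nccCount_one (m : Int) (h : m ≠ 0) : nccCount m 1 = 1 := by
  rw [nccCount]; simp [h]

theorem nccCount_full (w : Nat) (h : ((1 : Int) <<< w - 1) ≠ 0) :
    nccCount ((1 : Int) <<< w - 1) w = 1 := by
  have h' : (((1 <<< w : Nat) : Int) - 1) ≠ 0 := h
  have key : nccCount (((1 <<< w : Nat) : Int) - 1) w = 1 := by
    rw [nccCount, if_neg h', if_pos (Or.inr rfl)]
  exact key

theorem nccCount_guard (m : Int) (w : Nat) (h1 : m ≠ 0) (h2 : w ≠ 1)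
    (h3 : m ≠ (1 : Int) <<< w - 1) (h4 : w < 2) : nccCount m w = 0 := by
  have h3' : m ≠ ((1 <<< w : Nat) : Int) - 1 := h3
  rw [nccCount, if_neg h1, if_neg (not_or.mpr ⟨h2, h3'⟩), if_pos h4]

theorem nccCount_split (m : Int) (w : Nat) (h1 : m ≠ 0) (h2 : w ≠ 1)
    (h3 : m ≠ (1 : Int) <<< w - 1) (h4 : ¬ w < 2) :
    nccCount m w =
      nccCount (PySem.Int.band m ((1 : Int) <<< (w >>> 1) - 1)) (w >>> 1) +
      nccCount (m >>> (w >>> 1)) (w >>> 1) := by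
  have h3' : m ≠ ((1 <<< w : Nat) : Int) - 1 := h3
  have key : nccCount m w =
      nccCount (PySem.Int.band m (((1 <<< (w >>> 1) : Nat) : Int) - 1)) (w >>> 1) +
      nccCount (m >>> (w >>> 1)) (w >>> 1) := by
    rw [nccCount, if_neg h1, if_neg (not_or.mpr ⟨h2, h3'⟩), if_neg h4]
  exact key

-- A's stack loop computes the accumulator plus the sum of B's recursive count over
-- the stack entries.
theorem nccLoop_eq (stack : List (Int × Nat)) (total : Int) :
    nccLoop stack total = total + (stack.map (fun p => nccCount p.1 p.2)).sum := by
  induction stack, total using nccLoop.induct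
  case case1 => simp [nccLoop]
  case case2 =>
    rename_i total width rest ih
    rw [nccLoop]; simp [ih, nccCount_zero]
  case case3 =>
    rename_i total mask rest h ih
    rw [nccLoop]; simp [h, ih, nccCount_one mask h]; omega
  case case4 =>
    rename_i total width rest h1 h2 ih
    have hm : (((1 <<< width : Nat) : Int) - 1) ≠ 0 := h2
    have hw : width ≠ 1 := h1
    rw [nccLoop]; rw [if_neg hm, if_neg hw, if_pos rfl]
    simp [ih, nccCount_full width hm]; omega
  case case5 =>
    rename_i total mask width rest h1 h2 h3 h4 ih
    have hm0 : mask ≠ 0 := h1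
    have hw1 : width ≠ 1 := h2
    have hmf : mask ≠ ((1 <<< width : Nat) : Int) - 1 := h3
    have hlt : width < 2 := h4
    rw [nccLoop]; rw [if_neg hm0, if_neg hw1, if_neg hmf, if_pos hlt]
    rw [ih]; simp [nccCount_guard mask width hm0 hw1 hmf hlt]
  case case6 =>
    rename_i total mask width rest h1 h2 h3 h4 ih
    have hm0 : mask ≠ 0 := h1
    have hw1 : width ≠ 1 := h2
    have hmf : mask ≠ ((1 <<< width : Nat) : Int) - 1 := h3
    have hlt : ¬ width < 2 := h4
    rw [nccLoop]; rw [if_neg hm0, if_neg hw1, if_neg hmf, if_neg hlt]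
    rw [ih]; simp [nccCount_split mask width hm0 hw1 hmf hlt]; omega

-- ===== VERDICT (by name: the statement is the Claim_ definition above) =====
theorem node_cover_count_py_spec : Claim_equal_node_cover_count_py := by
  intro leaf_mask leaf_count _ _
  unfold Spec_node_cover_count_py node_cover_count_py node_cover_count_py_alt
  split_ifs <;> simp [nccLoop_eq]
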